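-- pv_equiv track=rewrite | github.com/5ampak/Compressor-Algorithm | compressed/compressed.py | compressedData
-- ===== SOURCE A (Python) =====
-- def compressedData(data, index):
--     compressed = []
--     word = ""
--
--     # Create a reverse index for faster lookup
--     word_index = {v: k for k, v in index.items()}
--
--     for char in data:
--         if char != ' ':
--             word += char
--         else:
--             if word:
--                 compressed.append(word_index.get(word, word))
--                 word = ""
--             compressed.append(char)  # Preserve spaces
--
--     if word:
--         compressed.append(word_index.get(word, word))
--
--     # Join the compressed list into a single string
--     return ''.join(compressed)
-- ===== SOURCE B (Python) =====
-- def compressedData(data, index):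
--     word_index = {v: k for k, v in index.items()}
--     return ' '.join(word_index.get(w, w) if w else w for w in data.split(' '))
-- ===== Notes on version B (the rewrite author's own statement) =====
-- stated objective: simpler
-- what changed: Replaces the manual char-by-char accumulation loop with a split(' ')/map/' '.join pass over tokens, mapping only non-empty tokens through the reverse index.
import Mathlib
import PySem

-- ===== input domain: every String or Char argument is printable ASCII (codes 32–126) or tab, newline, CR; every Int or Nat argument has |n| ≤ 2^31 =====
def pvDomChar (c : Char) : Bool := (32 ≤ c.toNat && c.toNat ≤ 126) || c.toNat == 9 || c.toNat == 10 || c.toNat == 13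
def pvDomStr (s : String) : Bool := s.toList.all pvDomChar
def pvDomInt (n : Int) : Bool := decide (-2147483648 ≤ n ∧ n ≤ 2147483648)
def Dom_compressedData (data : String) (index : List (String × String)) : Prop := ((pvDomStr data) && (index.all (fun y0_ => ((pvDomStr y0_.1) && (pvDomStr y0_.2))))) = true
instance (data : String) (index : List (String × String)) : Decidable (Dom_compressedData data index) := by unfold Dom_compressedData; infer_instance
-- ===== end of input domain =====

-- B replaces A's manual char-accumulation loop with a split(' ')/map/' '.join pass (simpler decomposition, same cost).


-- ===== PORT A =====
-- the reverse index {v: k for k, v in index.items()} (both Pythons build it with this same line)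
def pvRevIndex (index : List (String × String)) : PySem.Dict String String :=
  index.foldl (fun d kv => d.insert kv.2 kv.1) PySem.Dict.empty

-- word_index.get(word, word); the accumulated word is kept as List Char
def pvLookA (d : PySem.Dict String String) (w : List Char) : List Char :=
  (d.getD (String.ofList w) (String.ofList w)).toList

-- the body of A's `for char in data:` loop; state = (compressed, word)
def pvStepA (d : PySem.Dict String String) (st : List (List Char) × List Char) (c : Char) :
    List (List Char) × List Char :=
  if c ≠ ' ' then (st.1, st.2 ++ [c])
  else if st.2 ≠ [] then (st.1 ++ [pvLookA d st.2, [c]], [])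
  else (st.1 ++ [[c]], st.2)

def compressedData (data : String) (index : List (String × String)) : String :=
  let word_index := pvRevIndex index
  let st := data.toList.foldl (pvStepA word_index) ([], [])
  let compressed := if st.2 ≠ [] then st.1 ++ [pvLookA word_index st.2] else st.1
  String.ofList (PySem.Chars.join [] compressed)

-- ===== PORT B =====
def compressedData_alt (data : String) (index : List (String × String)) : String :=
  let word_index := pvRevIndex index
  PySem.Str.join " " (((PySem.Str.split? data " ").getD []).map
    (fun w => if w ≠ "" then word_index.getD w w else w))

-- ===== PRECONDITION & SPEC =====
def Spec_compressedData (data : String) (index : List (String × String)) (out : String) : Prop := out = compressedData_alt data index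
instance (data : String) (index : List (String × String)) (out : String) : Decidable (Spec_compressedData data index out) := by unfold Spec_compressedData; infer_instance

-- ===== CLAIM (what is proved, stated in full; the proofs are below) =====
def Claim_equal_compressedData : Prop := ∀ (data : String) (index : List (String × String)), Dom_compressedData data index → Spec_compressedData data index (compressedData data index)

-- ===== LEMMAS AND PROOFS =====

-- split on ' ' as a structural recursion: (first token, remaining tokens)
def pvSplitSp : List Char → List Char × List (List Char)
  | [] => ([], [])
  | c :: cs =>
    let r := pvSplitSp cs
    if c = ' ' then ([], r.1 :: r.2) else (c :: r.1, r.2)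

-- `word_index.get(w, w) if w else w` on char-list tokens
def pvFB (d : PySem.Dict String String) (t : List Char) : List Char :=
  if t ≠ [] then pvLookA d t else t

theorem pv_go_spec : ∀ (fuel : Nat) (l : List Char), l.length < fuel → ∀ (cur : List Char) (acc : List (List Char)),
    PySem.Chars.splitOn.go [' '] fuel l cur acc
      = acc.reverse ++ (cur.reverse ++ (pvSplitSp l).1) :: (pvSplitSp l).2 := by
  intro fuel
  induction fuel with
  | zero => intro l h; omega
  | succ n ih =>
    intro l h cur acc
    match l with
    | [] =>
      unfold PySem.Chars.splitOn.go
      simp [pvSplitSp]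
    | c :: rest =>
      unfold PySem.Chars.splitOn.go
      by_cases hc : c = ' '
      · subst hc
        simp only [List.isPrefixOf, beq_self_eq_true, Bool.true_and,
          if_pos, List.length_singleton, List.drop_succ_cons, List.drop_zero]
        rw [ih rest (by simpa using Nat.lt_of_succ_lt_succ h) [] (cur.reverse :: acc)]
        simp [pvSplitSp]
      · have hb : (' ' == c) = false := by simp [Ne.symm hc]
        simp only [List.isPrefixOf, hb, Bool.false_and, Bool.false_eq_true, if_false]
        rw [ih rest (by simpa using Nat.lt_of_succ_lt_succ h) (c :: cur) acc]
        simp [pvSplitSp, hc]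

theorem pv_splitOn_eq (cs : List Char) :
    PySem.Chars.splitOn cs [' '] = (pvSplitSp cs).1 :: (pvSplitSp cs).2 := by
  show PySem.Chars.splitOn.go [' '] (cs.length + 1) cs [] [] = _
  rw [pv_go_spec (cs.length + 1) cs (by omega) [] []]
  simp

theorem pv_join0_append (l : List (List Char)) (x : List Char) :
    PySem.Chars.join [] (l ++ [x]) = PySem.Chars.join [] l ++ x := by
  induction l with
  | nil => simp [PySem.Chars.join_nil, PySem.Chars.join_singleton]
  | cons y ys ih =>
    cases ys with
    | nil => simp [PySem.Chars.join_singleton, PySem.Chars.join_cons_cons]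
    | cons z zs =>
      have h1 : (y :: z :: zs) ++ [x] = y :: z :: (zs ++ [x]) := by simp
      rw [h1, PySem.Chars.join_cons_cons]
      rw [show z :: (zs ++ [x]) = (z :: zs) ++ [x] by simp, ih]
      rw [PySem.Chars.join_cons_cons]
      simp

theorem pv_A_loop (d : PySem.Dict String String) : ∀ (cs : List Char) (acc : List (List Char)) (w : List Char),
    PySem.Chars.join []
      (let st := cs.foldl (pvStepA d) (acc, w);
       if st.2 ≠ [] then st.1 ++ [pvLookA d st.2] else st.1)
      = PySem.Chars.join [] acc
        ++ PySem.Chars.join [' '] (((w ++ (pvSplitSp cs).1) :: (pvSplitSp cs).2).map (pvFB d)) := by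
  intro cs
  induction cs with
  | nil =>
    intro acc w
    by_cases hw : w = []
    · subst hw
      simp [pvSplitSp, pvFB, PySem.Chars.join_singleton]
    · simp [pvSplitSp, pvFB, hw, pv_join0_append, PySem.Chars.join_singleton]
  | cons c cs ih =>
    intro acc w
    have hsp1 : (pvSplitSp cs).1 :: (pvSplitSp cs).2 ≠ [] := by simp
    by_cases hc : c = ' '
    · subst hc
      have hsp : pvSplitSp (' ' :: cs) = ([], (pvSplitSp cs).1 :: (pvSplitSp cs).2) := by
        simp [pvSplitSp]
      by_cases hw : w = []
      · subst hw
        rw [show List.foldl (pvStepA d) (acc, ([] : List Char)) (' ' :: cs)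
              = List.foldl (pvStepA d) (acc ++ [[' ']], []) cs by simp [pvStepA]]
        rw [ih (acc ++ [[' ']]) []]
        rw [pv_join0_append, hsp]
        simp only [List.nil_append, List.append_nil, List.map_cons]
        rw [PySem.Chars.join_cons_cons]
        simp [pvFB]
      · rw [show List.foldl (pvStepA d) (acc, w) (' ' :: cs)
              = List.foldl (pvStepA d) (acc ++ [pvLookA d w, [' ']], []) cs by simp [pvStepA, hw]]
        rw [ih (acc ++ [pvLookA d w, [' ']]) []]
        rw [show acc ++ [pvLookA d w, [' ']] = (acc ++ [pvLookA d w]) ++ [[' ']] by simp]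
        rw [pv_join0_append, pv_join0_append, hsp]
        simp only [List.nil_append, List.append_nil, List.map_cons]
        rw [PySem.Chars.join_cons_cons]
        simp [pvFB, hw]
    · have hsp : pvSplitSp (c :: cs) = (c :: (pvSplitSp cs).1, (pvSplitSp cs).2) := by
        simp [pvSplitSp, hc]
      rw [show List.foldl (pvStepA d) (acc, w) (c :: cs)
            = List.foldl (pvStepA d) (acc, w ++ [c]) cs by simp [pvStepA, hc]]
      rw [ih acc (w ++ [c]), hsp]
      simp

theorem pv_str_ne_empty_iff (s : String) : (s ≠ "") ↔ s.toList ≠ [] := by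
  constructor
  · intro h hn; exact h (by cases s; simp_all)
  · intro h hn; subst hn; simp at h

theorem pv_toList_eq (data : String) (index : List (String × String)) :
    (compressedData data index).toList = (compressedData_alt data index).toList := by
  unfold compressedData compressedData_alt
  -- materialize the tokens of B
  obtain ⟨ps, hps, hmap⟩ : ∃ ps, PySem.Str.split? data " " = some ps ∧
      ps.map String.toList = PySem.Chars.splitOn data.toList [' '] := by
    have h := PySem.Str.split?_map data " "
    rw [show (" ").toList = [' '] from rfl] at h
    cases hsp : PySem.Str.split? data " " with
    | none =>
      rw [hsp] at h
      simp [PySem.Chars.split?] at h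
    | some ps =>
      rw [hsp] at h
      refine ⟨ps, rfl, ?_⟩
      simpa [PySem.Chars.split?] using h
  simp only [hps, Option.getD_some]
  rw [String.toList_ofList, PySem.Str.toList_join]
  have hA := pv_A_loop (pvRevIndex index) data.toList [] []
  simp only [List.nil_append, PySem.Chars.join_nil] at hA
  rw [hA]
  have hpt : (ps.map (fun w => if w ≠ "" then (pvRevIndex index).getD w w else w)).map String.toList
      = (ps.map String.toList).map (pvFB (pvRevIndex index)) := by
    simp only [List.map_map]
    apply List.map_congr_left
    intro w _
    by_cases hw : w = ""
    · subst hw; simp [pvFB]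
    · have hw' : w.toList ≠ [] := (pv_str_ne_empty_iff w).mp hw
      simp [pvFB, hw, hw', pvLookA, Function.comp]
  rw [hpt, hmap, pv_splitOn_eq]
  simp

-- ===== VERDICT (by name: the statement is the Claim_ definition above) =====
theorem compressedData_spec : Claim_equal_compressedData := by
  intro data index _
  unfold Spec_compressedData
  have h := congrArg String.ofList (pv_toList_eq data index)
  simpa using h
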